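-- pv_equiv track=rewrite | github.com/kmehran1106/HackerRank-Python | Easy/Jumping Cloud/code_jumping_clouds.py | jumping_cloud
-- ===== SOURCE A (Python) =====
-- from typing import List
--
-- def jumping_cloud(clouds: List[int], k: int) -> int:
--     e = 100
--     n = len(clouds)
--     # initial case
--     i = k % n
--     e = e - 3 if clouds[i] == 1 else e - 1
--     while i != 0:
--         i = (i + k) % n
--         e = e - 3 if clouds[i] == 1 else e - 1
--     return e
-- ===== SOURCE B (Python) =====
-- from typing import List
--
-- def jumping_cloud(clouds: List[int], k: int) -> int:
--     # Number-theoretic form: the walk visits exactly the multiples of g = gcd(n, k),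
--     # n//g clouds in total; each visit costs 1, plus 2 extra when the cloud is 1.
--     n = len(clouds)
--     g, r = n, abs(k)          # Euclid's algorithm (gcd, hand-rolled: no extra imports)
--     while r:
--         g, r = r, g % r
--     ones = sum(1 for j in range(0, n, g) if clouds[j] == 1)
--     return 100 - n // g - 2 * ones
-- ===== Notes on version B (the rewrite author's own statement) =====
-- stated objective: faster
-- what changed: Replaces A's step-by-step modular walk (while-loop updating i=(i+k)%n until it returns to 0) with a number-theoretic closed form: the visited clouds are exactly the multiples of g=gcd(n,k), so B counts ones over range(0,n,g) and returns 100 - n//g - 2*ones.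
import Mathlib
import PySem

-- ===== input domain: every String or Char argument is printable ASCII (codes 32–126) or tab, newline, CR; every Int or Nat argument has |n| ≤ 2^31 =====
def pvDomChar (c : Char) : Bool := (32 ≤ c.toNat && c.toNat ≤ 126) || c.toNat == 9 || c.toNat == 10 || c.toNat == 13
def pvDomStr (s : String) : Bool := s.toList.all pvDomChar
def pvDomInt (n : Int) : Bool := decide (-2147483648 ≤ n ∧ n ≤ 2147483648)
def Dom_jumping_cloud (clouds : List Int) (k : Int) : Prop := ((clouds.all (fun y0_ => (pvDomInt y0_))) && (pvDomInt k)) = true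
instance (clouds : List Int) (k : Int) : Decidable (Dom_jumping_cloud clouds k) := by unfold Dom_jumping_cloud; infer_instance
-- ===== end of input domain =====

-- B replaces A's modular walk by the gcd closed form (100 - n//g - 2*ones over range(0,n,g));
-- measurably faster by a constant factor in Python. A raises ZeroDivisionError on empty clouds
-- (excluded by Pre_).

-- ===== PORT A =====
-- A's while-loop; fuel clouds.length is an upper bound on the remaining iterations
-- (the walk returns to 0 after at most n steps), so the fuel-0 branch is unreachable under Pre_.
def jcLoop (clouds : List Int) (k n : Int) (i e : Int) (fuel : Nat) : Int :=
  match fuel with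
  | 0 => e
  | fuel + 1 =>
    if i == 0 then e
    else
      let i' := PySem.Int.mod (i + k) n
      -- clouds[i'] : i' is always in range when n > 0 (Python mod of a positive modulus), so the default is never used
      let e' := if PySem.List.pyGetD clouds i' 0 == 1 then e - 3 else e - 1
      jcLoop clouds k n i' e' fuel

def jumping_cloud (clouds : List Int) (k : Int) : Int :=
  let e : Int := 100
  let n : Int := clouds.length
  let i := PySem.Int.mod k n
  let e := if PySem.List.pyGetD clouds i 0 == 1 then e - 3 else e - 1
  jcLoop clouds k n i e clouds.length

-- ===== PORT B =====
-- Euclid's algorithm, the while-loop of Source B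
def pvGcd (g r : Nat) : Nat :=
  if _h : r = 0 then g else pvGcd r (g % r)
termination_by r
decreasing_by exact Nat.mod_lt _ (by omega)

def jumping_cloud_alt (clouds : List Int) (k : Int) : Int :=
  let n := clouds.length
  let g := pvGcd n k.natAbs
  -- clouds[j] : every j produced by range(0, n, g) is in [0, n), so the default is never used
  let ones : Int := ((PySem.List.pyRange 0 (n : Int) (g : Int)).countP
    (fun j => PySem.List.pyGetD clouds j 0 == 1) : Nat)
  100 - PySem.Int.floordiv (n : Int) (g : Int) - 2 * ones

-- ===== PRECONDITION & SPEC =====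
-- Pre_ excludes only the empty list, on which Python A raises ZeroDivisionError at 'k % n'.
def Pre_jumping_cloud (clouds : List Int) (k : Int) : Prop := clouds ≠ []
instance (clouds : List Int) (k : Int) : Decidable (Pre_jumping_cloud clouds k) := by
  unfold Pre_jumping_cloud; infer_instance
def pvWitness_jumping_cloud : List Int × Int := ([1, 0, 0, 1], 2)

def Spec_jumping_cloud (clouds : List Int) (k : Int) (out : Int) : Prop := out = jumping_cloud_alt clouds k
instance (clouds : List Int) (k : Int) (out : Int) : Decidable (Spec_jumping_cloud clouds k out) := by
  unfold Spec_jumping_cloud; infer_instance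

-- ===== CLAIM (what is proved, stated in full; the proofs are below) =====
def Claim_equal_jumping_cloud : Prop := ∀ (clouds : List Int) (k : Int), Dom_jumping_cloud clouds k → Pre_jumping_cloud clouds k → Spec_jumping_cloud clouds k (jumping_cloud clouds k)

-- ===== LEMMAS AND PROOFS =====

-- cost of visiting cloud x; the orbit position after m steps
def jcCost (clouds : List Int) (x : Int) : Int :=
  if PySem.List.pyGetD clouds x 0 == 1 then 3 else 1

def jcF (k N : Int) (m : Nat) : Int := ((m : Int) * k) % N

-- Source B's Euclid loop computes the gcd
lemma pvGcd_eq (r g : Nat) : pvGcd g r = Nat.gcd r g := by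
  induction r using Nat.strong_induction_on generalizing g with
  | _ r ih =>
    rw [pvGcd]
    rcases Nat.eq_zero_or_pos r with h | h
    · simp [h]
    · rw [dif_neg (by omega), ih (g % r) (Nat.mod_lt _ h), Nat.gcd_rec r g]

-- divisibility core: N ∣ c*k ↔ (n/g) ∣ c, where g = gcd(N, k)
lemma jc_dvd_iff {N k : Int} (hN : 0 < N) (c : Int) :
    N ∣ c * k ↔ ((N / (Int.gcd N k : Int))) ∣ c := by
  set g : Nat := Int.gcd N k with hg
  have hgpos : 0 < g := Int.gcd_pos_iff.mpr (Or.inl (by omega))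
  obtain ⟨N', hN'⟩ := Int.gcd_dvd_left N k
  obtain ⟨k', hk'⟩ := Int.gcd_dvd_right N k
  rw [← hg] at hN' hk'
  have hgne : (g : Int) ≠ 0 := by exact_mod_cast hgpos.ne'
  have hNdiv : N / (g : Int) = N' := by rw [hN', Int.mul_ediv_cancel_left _ hgne]
  have hkdiv : k / (g : Int) = k' := by rw [hk', Int.mul_ediv_cancel_left _ hgne]
  have hcop : IsCoprime N' k' := by
    rw [Int.isCoprime_iff_gcd_eq_one, ← hNdiv, ← hkdiv]
    exact Int.gcd_div_gcd_div_gcd (by exact_mod_cast hgpos)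
  rw [hNdiv]
  constructor
  · intro h
    have : N' ∣ c * k' := by
      have h2 : (g : Int) * N' ∣ (g : Int) * (c * k') := by
        rw [← hN']
        have : (g : Int) * (c * k') = c * k := by rw [hk']; ring
        rw [this]; exact h
      exact (mul_dvd_mul_iff_left hgne).mp h2
    exact hcop.dvd_of_dvd_mul_right this
  · rintro ⟨d, rfl⟩
    exact ⟨d * k', by rw [hN', hk']; ring⟩

-- the orbit returns to 0 exactly at multiples of T = n/g
lemma jcF_eq_zero_iff {k N : Int} (hN : 0 < N) {T : Nat}
    (hT : (T : Int) = N / (Int.gcd N k : Int)) (m : Nat) :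
    jcF k N m = 0 ↔ T ∣ m := by
  rw [jcF, PySem.Int.emod_eq_zero_iff_dvd, jc_dvd_iff hN, ← hT, Int.natCast_dvd_natCast]

-- one loop step advances the orbit index
lemma jcF_succ {k N : Int} (m : Nat) : (jcF k N m + k) % N = jcF k N (m + 1) := by
  simp only [jcF]
  rw [Int.emod_add_emod]
  congr 1
  push_cast
  ring

lemma jcF_nonneg {k N : Int} (hN : 0 < N) (m : Nat) : 0 ≤ jcF k N m :=
  Int.emod_nonneg _ (by omega)

lemma jcF_lt {k N : Int} (hN : 0 < N) (m : Nat) : jcF k N m < N :=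
  Int.emod_lt_of_pos _ hN

lemma jcF_g_dvd {k N : Int} (m : Nat) : (Int.gcd N k : Int) ∣ jcF k N m := by
  rw [← PySem.Int.emod_eq_zero_iff_dvd, jcF,
    Int.emod_emod_of_dvd _ (Int.gcd_dvd_left N k), PySem.Int.emod_eq_zero_iff_dvd]
  exact Dvd.dvd.mul_left (Int.gcd_dvd_right N k) _

-- the loop, started at orbit position m with 1 ≤ m ≤ T, subtracts the costs of positions m+1 … T
lemma jcLoop_eq (clouds : List Int) (k : Int) {N : Int}
    (hN0 : 0 < N) {T : Nat} (hT : (T : Int) = N / (Int.gcd N k : Int)) (hT0 : 0 < T) :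
    ∀ (fuel m : Nat) (e : Int), 1 ≤ m → m ≤ T → T - m ≤ fuel →
      jcLoop clouds k N (jcF k N m) e fuel =
        e - ∑ j ∈ Finset.range (T - m), jcCost clouds (jcF k N (m + 1 + j)) := by
  intro fuel
  induction fuel with
  | zero =>
    intro m e hm1 hmT hfuel
    have hmeq : m = T := by omega
    simp [jcLoop, hmeq]
  | succ fuel ih =>
    intro m e hm1 hmT hfuel
    rw [jcLoop]
    by_cases h0 : jcF k N m = 0
    · have : T ∣ m := (jcF_eq_zero_iff hN0 hT m).mp h0
      have hmeq : m = T := by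
        rcases this with ⟨c, rfl⟩
        rcases Nat.eq_zero_or_pos c with rfl | hc
        · omega
        · nlinarith [Nat.le_mul_of_pos_right T hc]
      subst hmeq
      rw [h0]
      simp
    · have hne : (jcF k N m == 0) = false := by simp [h0]
      rw [hne]
      simp only [Bool.false_eq_true, if_false]
      have hmlt : m < T := by
        rcases Nat.lt_or_ge m T with h | h
        · exact h
        · exfalso; exact h0 ((jcF_eq_zero_iff hN0 hT m).mpr ⟨1, by omega⟩)
      have hmod : PySem.Int.mod (jcF k N m + k) N = jcF k N (m + 1) := by
        rw [PySem.Int.mod_eq_emod_of_pos hN0, jcF_succ]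
      rw [hmod]
      have hrec := ih (m + 1) (if PySem.List.pyGetD clouds (jcF k N (m+1)) 0 == 1 then e - 3 else e - 1)
        (by omega) (by omega) (by omega)
      rw [hrec]
      have hsplit : T - m = (T - (m + 1)) + 1 := by omega
      rw [hsplit, Finset.sum_range_succ']
      have hcost : (if PySem.List.pyGetD clouds (jcF k N (m+1)) 0 == 1 then e - 3 else e - 1)
          = e - jcCost clouds (jcF k N (m + 1)) := by
        rw [jcCost]; split <;> ring
      rw [hcost]
      have hidx : ∀ j, jcF k N (m + 1 + (j + 1)) = jcF k N (m + 1 + 1 + j) := by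
        intro j; congr 1; omega
      simp only [hidx]
      have : jcF k N (m + 1 + 0) = jcF k N (m + 1) := by norm_num
      rw [this]
      ring

-- list-count ↔ finset-sum bridge
lemma jc_countP_range (q : Nat → Bool) (T : Nat) :
    ((List.range T).countP q : Int) = ∑ t ∈ Finset.range T, (if q t then (1 : Int) else 0) := by
  induction T with
  | zero => simp
  | succ T ih =>
    rw [List.range_succ, List.countP_append, Finset.sum_range_succ, ← ih]
    by_cases hq : q T
    · simp [hq]
    · simp [hq]

-- the orbit positions 1..T hit each multiple of g in [0, N) exactly once
lemma jc_orbit_image (clouds : List Int) (k : Int) {N : Int} (hN0 : 0 < N) {g : Nat}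
    (hg : g = Int.gcd N k) {T : Nat} (hT : (T : Int) = N / (g : Int)) :
    ∑ j ∈ Finset.range T, jcCost clouds (jcF k N (j + 1)) =
      ∑ t ∈ Finset.range T, jcCost clouds ((g : Int) * t) := by
  have hgpos : 0 < g := by rw [hg]; exact Int.gcd_pos_iff.mpr (Or.inl (by omega))
  have hgne : (g : Int) ≠ 0 := by exact_mod_cast hgpos.ne'
  have hgdvd : (g : Int) ∣ N := by rw [hg]; exact Int.gcd_dvd_left N k
  have hNT : N = (g : Int) * T := by
    obtain ⟨c, hc⟩ := hgdvd
    rw [hT, hc, Int.mul_ediv_cancel_left _ hgne]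
  -- injectivity of j ↦ jcF (j+1) on range T
  have hinj : Set.InjOn (fun j : Nat => jcF k N (j + 1)) ↑(Finset.range T) := by
    intro a ha b hb hab
    simp only [Finset.coe_range, Set.mem_Iio] at ha hb
    simp only [jcF] at hab
    have hdvd : N ∣ ((a : Int) + 1 - ((b : Int) + 1)) * k := by
      have hab' : ((a:Int)+1) * k % N = ((b:Int)+1) * k % N := by
        calc ((a:Int)+1) * k % N = ((a+1 : Nat) : Int) * k % N := by push_cast; ring_nf
          _ = ((b+1 : Nat) : Int) * k % N := hab
          _ = ((b:Int)+1) * k % N := by push_cast; ring_nf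
      have hz := Int.emod_eq_emod_iff_emod_sub_eq_zero.mp hab'
      have hd := (PySem.Int.emod_eq_zero_iff_dvd _ _).mp hz
      have heq : ((a : Int) + 1 - ((b : Int) + 1)) * k = ((a:Int)+1) * k - ((b:Int)+1) * k := by ring
      rw [heq]; exact hd
    have hTd : ((T : Int)) ∣ ((a : Int) + 1 - ((b : Int) + 1)) := by
      have := (jc_dvd_iff hN0 ((a : Int) + 1 - ((b : Int) + 1))).mp hdvd
      rwa [← hg, ← hT] at this
    have hz : (a : Int) + 1 - ((b : Int) + 1) = 0 := by
      refine Int.eq_zero_of_abs_lt_dvd hTd ?_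
      rw [abs_lt]
      constructor <;> [exact_mod_cast (by omega : -(T : Int) < (a:Int) + 1 - ((b:Int)+1)) ;
        exact_mod_cast (by omega : (a:Int) + 1 - ((b:Int)+1) < (T : Int))]
    omega
  have hinj2 : Set.InjOn (fun t : Nat => (g : Int) * t) ↑(Finset.range T) := by
    intro a _ b _ hab
    simp only at hab
    have : (a : Int) = b := by
      have := mul_left_cancel₀ hgne hab
      exact_mod_cast this
    exact_mod_cast this
  -- both images have card T; the orbit image is contained in the multiples image
  have hsub : Finset.image (fun j : Nat => jcF k N (j + 1)) (Finset.range T) ⊆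
      Finset.image (fun t : Nat => (g : Int) * t) (Finset.range T) := by
    intro x hx
    simp only [Finset.mem_image, Finset.mem_range] at hx ⊢
    obtain ⟨j, hj, rfl⟩ := hx
    obtain ⟨c, hc⟩ := jcF_g_dvd (k := k) (N := N) (m := j + 1)
    rw [← hg] at hc
    have hc0 : 0 ≤ c := by
      have := jcF_nonneg hN0 (k := k) (j + 1)
      rw [hc] at this
      nlinarith [Int.natCast_pos.mpr hgpos]
    have hcT : c < (T : Int) := by
      have hlt := jcF_lt hN0 (k := k) (m := j + 1)
      rw [hc, hNT] at hlt
      have hgposI : (0 : Int) < g := by exact_mod_cast hgpos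
      exact lt_of_mul_lt_mul_left hlt (le_of_lt hgposI)
    refine ⟨c.toNat, by omega, ?_⟩
    rw [hc, Int.toNat_of_nonneg hc0]
  have heq : Finset.image (fun j : Nat => jcF k N (j + 1)) (Finset.range T) =
      Finset.image (fun t : Nat => (g : Int) * t) (Finset.range T) := by
    apply Finset.eq_of_subset_of_card_le hsub
    rw [Finset.card_image_of_injOn hinj, Finset.card_image_of_injOn hinj2]
  calc ∑ j ∈ Finset.range T, jcCost clouds (jcF k N (j + 1))
      = ∑ x ∈ Finset.image (fun j : Nat => jcF k N (j + 1)) (Finset.range T), jcCost clouds x :=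
        (Finset.sum_image hinj).symm
    _ = ∑ x ∈ Finset.image (fun t : Nat => (g : Int) * t) (Finset.range T), jcCost clouds x := by
        rw [heq]
    _ = ∑ t ∈ Finset.range T, jcCost clouds ((g : Int) * t) := Finset.sum_image hinj2

-- ===== VERDICT (by name: the statement is the Claim_ definition above) =====
theorem jumping_cloud_spec : Claim_equal_jumping_cloud := by
  intro clouds k _ hpre
  unfold Spec_jumping_cloud
  have hn : 0 < clouds.length := List.length_pos_iff.mpr hpre
  set n := clouds.length with hn_def
  set N : Int := (n : Int) with hNdef
  have hN0 : (0 : Int) < N := by rw [hNdef]; exact_mod_cast hn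
  set g : Nat := Int.gcd N k with hg
  have hgpos : 0 < g := Int.gcd_pos_iff.mpr (Or.inl (by omega))
  have hgne : (g : Int) ≠ 0 := by exact_mod_cast hgpos.ne'
  have hpv : pvGcd n k.natAbs = g := by
    have hnat : N.natAbs = n := by simp [hNdef]
    rw [pvGcd_eq, hg, Int.gcd, hnat, Nat.gcd_comm]
  have hgdvdN : g ∣ n := by
    have h1 := Int.gcd_dvd_left N k
    rw [← hg, hNdef] at h1
    exact_mod_cast h1
  set T : Nat := n / g with hTdef
  have hTcast : (T : Int) = N / (g : Int) := by
    rw [hTdef, hNdef]; exact_mod_cast Int.natCast_div n g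
  have hT0 : 0 < T := Nat.div_pos (Nat.le_of_dvd hn hgdvdN) hgpos
  have hTn : T ≤ n := Nat.div_le_self n g
  have hNT : N = (g : Int) * T := by
    obtain ⟨c, hc⟩ := hgdvdN
    rw [hTcast]
    obtain ⟨d, hd⟩ : (g : Int) ∣ N := ⟨c, by rw [hNdef, hc]; push_cast; ring⟩
    rw [hd, Int.mul_ediv_cancel_left _ hgne]
  -- ===== A side: the loop subtracts the costs of orbit positions 1 .. T =====
  have hAside : jumping_cloud clouds k = 100 - ∑ j ∈ Finset.range T, jcCost clouds (jcF k N (j + 1)) := by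
    have hi : PySem.Int.mod k N = jcF k N 1 := by
      rw [PySem.Int.mod_eq_emod_of_pos hN0, jcF]; norm_num
    have hloop := jcLoop_eq clouds k hN0 hTcast hT0 n 1
      (if PySem.List.pyGetD clouds (jcF k N 1) 0 == 1 then (100 : Int) - 3 else 100 - 1)
      le_rfl hT0 (by omega)
    simp only [jumping_cloud]
    rw [← hNdef, ← hn_def, hi, hloop]
    have he1 : (if PySem.List.pyGetD clouds (jcF k N 1) 0 == 1 then (100 : Int) - 3 else 100 - 1)
        = 100 - jcCost clouds (jcF k N 1) := by
      rw [jcCost]; split <;> ring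
    rw [he1]
    have hTsplit : T = (T - 1) + 1 := by omega
    rw [hTsplit, Finset.sum_range_succ']
    have hidx : ∀ j : Nat, jcCost clouds (jcF k N (j + 1 + 1)) = jcCost clouds (jcF k N (1 + 1 + j)) := by
      intro j; congr 2; omega
    simp only [hidx]
    have h0 : jcF k N (0 + 1) = jcF k N 1 := by norm_num
    rw [h0]
    have hTsub : (T - 1) + 1 - 1 = T - 1 := by omega
    rw [hTsub]
    ring
  -- ===== B side: the closed form counts the same costs over the multiples of g =====
  have hp : ∀ t : Nat, jcCost clouds ((g : Int) * t) =
      1 + 2 * (if (PySem.List.pyGetD clouds ((g : Int) * (t : Int)) 0 == 1) then (1 : Int) else 0) := by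
    intro t; rw [jcCost]; split <;> ring
  have hBside : jumping_cloud_alt clouds k = 100 - ∑ t ∈ Finset.range T, jcCost clouds ((g : Int) * t) := by
    simp only [jumping_cloud_alt]
    rw [← hn_def, hpv]
    have hgposI : (0 : Int) < (g : Int) := by exact_mod_cast hgpos
    rw [PySem.List.pyRange_of_pos 0 (n : Int) hgposI]
    have hcount : ((((n : Int) - 0 + (g : Int) - 1) / (g : Int))).toNat = T := by
      have harith : ((n : Int) - 0 + (g : Int) - 1) = ((g : Int) - 1) + (T : Int) * (g : Int) := by
        rw [← hNdef, hNT]; ring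
      rw [harith, Int.add_mul_ediv_right _ _ hgne,
        Int.ediv_eq_zero_of_lt (by omega) (by omega)]
      omega
    have hif : (if (0 : Int) < (n : Int) then ((((n : Int) - 0 + (g : Int) - 1) / (g : Int))).toNat else 0) = T := by
      rw [if_pos (by exact_mod_cast hn), hcount]
    rw [hif]
    rw [List.countP_map]
    have hfloor : PySem.Int.floordiv (n : Int) (g : Int) = (T : Int) := by
      rw [PySem.Int.floordiv_eq_ediv_of_pos hgposI, ← hNdef, ← hTcast]
    rw [hfloor]
    have hones : (((List.range T).countP
        ((fun j => PySem.List.pyGetD clouds j 0 == 1) ∘ fun t : Nat => 0 + (g : Int) * (t : Int))) : Int)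
        = ∑ t ∈ Finset.range T, (if (PySem.List.pyGetD clouds ((g : Int) * (t : Int)) 0 == 1) then (1 : Int) else 0) := by
      rw [jc_countP_range]
      refine Finset.sum_congr rfl fun t _ => ?_
      simp [Function.comp]
    rw [hones]
    have hsum : ∑ t ∈ Finset.range T, jcCost clouds ((g : Int) * t)
        = (T : Int) + 2 * ∑ t ∈ Finset.range T,
            (if (PySem.List.pyGetD clouds ((g : Int) * (t : Int)) 0 == 1) then (1 : Int) else 0) := by
      rw [Finset.sum_congr rfl fun t _ => hp t, Finset.sum_add_distrib, ← Finset.mul_sum,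
        Finset.sum_const, Finset.card_range]
      ring
    rw [hsum]
    ring
  rw [hAside, hBside, jc_orbit_image clouds k hN0 hg hTcast]
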